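-- pv_equiv track=rewrite | github.com/pedrocpereira/LA2 | treinos/treino2.py | build
-- ===== SOURCE A (Python) =====
-- def build(ruas):
--     adj = {}
--     for rua in ruas:
--         x, y = rua[0], rua[-1]
--         if x not in adj:
--             adj[x] = {}
--         if y not in adj:
--             adj[y] = {}
--         if x != y:
--             if x not in adj[y]:
--                 adj[x][y] = len(rua)
--                 adj[y][x] = len(rua)
--             else:
--                 adj[x][y] = min(len(rua), adj[x][y])
--                 adj[y][x] = min(len(rua), adj[y][x])
--     return adj
-- ===== SOURCE B (Python) =====
-- def build(ruas):
--     # Aggregate first, materialize second: one pass collects the nodes in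
--     # first-appearance order and the minimum weight per unordered endpoint
--     # pair (keyed by the sorted pair, in first-appearance order); then the
--     # adjacency dict is produced by two comprehensions.
--     ends = [(r[0], r[-1], len(r)) for r in ruas]
--     nodes = []
--     w = {}
--     for x, y, n in ends:
--         if x not in nodes:
--             nodes.append(x)
--         if y not in nodes:
--             nodes.append(y)
--         if x != y:
--             k = (x, y) if x < y else (y, x)
--             w[k] = min(n, w.get(k, n))
--     return {u: {(b if a == u else a): w[(a, b)]
--                 for (a, b) in w if u == a or u == b}
--             for u in nodes}
-- ===== Notes on version B (the rewrite author's own statement) =====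
-- stated objective: alternative
-- what changed: A mutates a dict-of-dicts incrementally per street; B aggregates first (one pass collecting nodes in first-appearance order and the minimum weight per sorted endpoint pair) and then materializes the adjacency dict with two comprehensions.
import Mathlib
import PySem

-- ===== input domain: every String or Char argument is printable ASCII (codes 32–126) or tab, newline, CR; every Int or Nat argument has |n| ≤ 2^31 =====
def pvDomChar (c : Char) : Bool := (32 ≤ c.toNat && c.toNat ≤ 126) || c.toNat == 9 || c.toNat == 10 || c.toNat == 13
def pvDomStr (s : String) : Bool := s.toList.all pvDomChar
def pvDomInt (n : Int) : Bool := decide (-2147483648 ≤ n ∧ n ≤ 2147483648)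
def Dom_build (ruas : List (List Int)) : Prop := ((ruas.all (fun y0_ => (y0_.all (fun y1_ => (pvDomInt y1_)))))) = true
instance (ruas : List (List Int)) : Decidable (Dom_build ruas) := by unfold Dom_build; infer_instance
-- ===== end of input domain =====

-- B aggregates first (nodes in first-appearance order, min weight per sorted endpoint pair),
-- then materializes the adjacency dict; A mutates a dict-of-dicts street by street.

-- ===== PORT A =====
-- one iteration of A's loop, on the already-extracted (x, y, len(rua)) triple
def pvStepA (adj : PySem.Dict Int (PySem.Dict Int Int)) (t : Int × Int × Int) :
    PySem.Dict Int (PySem.Dict Int Int) :=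
  let x := t.1; let y := t.2.1; let w := t.2.2
  let a1 := if adj.contains x then adj else adj.insert x PySem.Dict.empty
  let a2 := if a1.contains y then a1 else a1.insert y PySem.Dict.empty
  if x ≠ y then
    if ¬ ((a2.getD y PySem.Dict.empty).contains x = true) then
      let a3 := a2.insert x ((a2.getD x PySem.Dict.empty).insert y w)
      a3.insert y ((a3.getD y PySem.Dict.empty).insert x w)
    else
      -- both inner values are present here (adjacency is kept symmetric), so getD is exact
      let a3 := a2.insert x ((a2.getD x PySem.Dict.empty).insert y
                    (min w ((a2.getD x PySem.Dict.empty).getD y 0)))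
      a3.insert y ((a3.getD y PySem.Dict.empty).insert x
                    (min w ((a3.getD y PySem.Dict.empty).getD x 0)))
  else a2

def build (ruas : List (List Int)) : List (Int × List (Int × Int)) :=
  (ruas.foldl (fun adj rua =>
      match PySem.List.pyGet? rua 0, PySem.List.pyGet? rua (-1) with
      | some x, some y => pvStepA adj (x, y, (rua.length : Int))
      | _, _ => adj   -- unreachable under Pre_build (rua ≠ [])
    ) PySem.Dict.empty).items.map (fun p => (p.1, p.2.items))

-- ===== PORT B =====
-- (r[0], r[-1], len(r)); the default branch is unreachable under Pre_build
def pvEndsB (r : List Int) : Int × Int × Int :=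
  ((PySem.List.pyGet? r 0).getD 0, (PySem.List.pyGet? r (-1)).getD 0, (r.length : Int))

-- one iteration of B's aggregation loop: nodes (a first-appearance list) and min weight per sorted pair
def pvStepB (s : List Int × PySem.Dict (Int × Int) Int) (t : Int × Int × Int) :
    List Int × PySem.Dict (Int × Int) Int :=
  let ns := PySem.Set.add (PySem.Set.add s.1 t.1) t.2.1
  if t.1 ≠ t.2.1 then
    let k := if t.1 < t.2.1 then (t.1, t.2.1) else (t.2.1, t.1)
    (ns, s.2.insert k (min t.2.2 (s.2.getD k t.2.2)))
  else (ns, s.2)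

-- the two comprehensions (keys are distinct by construction, so a dict comprehension is a map)
def innerList (w : PySem.Dict (Int × Int) Int) (u : Int) : List (Int × Int) :=
  (w.items.filter (fun kv => u = kv.1.1 ∨ u = kv.1.2)).map
    (fun kv => (if kv.1.1 = u then kv.1.2 else kv.1.1, kv.2))

def build_alt (ruas : List (List Int)) : List (Int × List (Int × Int)) :=
  let ends := ruas.map pvEndsB
  let s := ends.foldl pvStepB ([], PySem.Dict.empty)
  s.1.map (fun u => (u, innerList s.2 u))

-- ===== PRECONDITION & SPEC =====
-- Pre_build excludes exactly the inputs containing an empty street, on which A raises IndexError (rua[0]).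
def Pre_build (ruas : List (List Int)) : Prop := ∀ r ∈ ruas, r ≠ []
instance (ruas : List (List Int)) : Decidable (Pre_build ruas) := by unfold Pre_build; infer_instance
def pvWitness_build : List (List Int) := [[1, 2], [2, 7, 1], [1, 3, 2], [5, 5], [1, 2, 2]]

def Spec_build (ruas : List (List Int)) (out : List (Int × List (Int × Int))) : Prop := out = build_alt ruas
instance (ruas : List (List Int)) (out : List (Int × List (Int × Int))) : Decidable (Spec_build ruas out) := by unfold Spec_build; infer_instance

-- ===== CLAIM (what is proved, stated in full; the proofs are below) =====
def Claim_equal_build : Prop := ∀ (ruas : List (List Int)), Dom_build ruas → Pre_build ruas → Spec_build ruas (build ruas)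

-- ===== LEMMAS AND PROOFS =====

-- ===== proof-side helpers =====
def pKey (x y : Int) : Int × Int := if x < y then (x, y) else (y, x)

def nStep (ns : List Int) (t : Int × Int × Int) : List Int :=
  PySem.Set.add (PySem.Set.add ns t.1) t.2.1

def wStep (d : PySem.Dict (Int × Int) Int) (t : Int × Int × Int) : PySem.Dict (Int × Int) Int :=
  if t.1 ≠ t.2.1 then d.insert (pKey t.1 t.2.1) (min t.2.2 (d.getD (pKey t.1 t.2.1) t.2.2)) else d

def nodesOf (ts : List (Int × Int × Int)) : List Int := ts.foldl nStep []
def wOf (ts : List (Int × Int × Int)) : PySem.Dict (Int × Int) Int := ts.foldl wStep PySem.Dict.empty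

def padj (N : List Int) (g : Int → PySem.Dict Int Int) : PySem.Dict Int (PySem.Dict Int Int) :=
  PySem.Dict.mk (N.map (fun n => (n, g n)))

def dictOf (ts : List (Int × Int × Int)) : PySem.Dict Int (PySem.Dict Int Int) :=
  padj (nodesOf ts) (fun u => PySem.Dict.mk (innerList (wOf ts) u))

def WFW (W : PySem.Dict (Int × Int) Int) (N : List Int) : Prop :=
  W.keys.Nodup ∧ ∀ k ∈ W.keys, k.1 < k.2 ∧ k.1 ∈ N ∧ k.2 ∈ N

-- pKey basics
lemma pKey_comm (x y : Int) : pKey x y = pKey y x := by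
  unfold pKey; split_ifs with h1 h2 h2 <;> simp [Prod.ext_iff] <;> omega

lemma pKey_fst_lt (x y : Int) (h : x ≠ y) : (pKey x y).1 < (pKey x y).2 := by
  unfold pKey; split_ifs with h1 <;> simp <;> omega

lemma pKey_mem_left (x y : Int) : (pKey x y).1 = x ∨ (pKey x y).1 = y := by
  unfold pKey; split_ifs <;> simp

lemma pKey_mem_right (x y : Int) : (pKey x y).2 = x ∨ (pKey x y).2 = y := by
  unfold pKey; split_ifs <;> simp

-- Set.add facts
lemma set_add_nodup (s : List Int) (h : s.Nodup) (x : Int) : (PySem.Set.add s x).Nodup := by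
  unfold PySem.Set.add
  split_ifs with hc
  · exact h
  · simp at hc
    simp [List.nodup_append, h]
    intro a ha e; exact hc (e ▸ ha)

-- nodesOf / wOf step equations
lemma nodesOf_append (ts : List (Int × Int × Int)) (t : Int × Int × Int) :
    nodesOf (ts ++ [t]) = PySem.Set.add (PySem.Set.add (nodesOf ts) t.1) t.2.1 := by
  simp [nodesOf, List.foldl_append, nStep]

lemma wOf_append (ts : List (Int × Int × Int)) (t : Int × Int × Int) :
    wOf (ts ++ [t]) = wStep (wOf ts) t := by
  simp [wOf, List.foldl_append]

lemma nodesOf_nodup (ts : List (Int × Int × Int)) : (nodesOf ts).Nodup := by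
  induction ts using List.reverseRecOn with
  | nil => simp [nodesOf]
  | append_singleton ts t ih =>
      rw [nodesOf_append]
      exact set_add_nodup _ (set_add_nodup _ ih _) _

lemma wOf_wf (ts : List (Int × Int × Int)) : WFW (wOf ts) (nodesOf ts) := by
  induction ts using List.reverseRecOn with
  | nil => constructor <;> simp [wOf, PySem.Dict.empty]
  | append_singleton ts t ih =>
      obtain ⟨hnd, hmem⟩ := ih
      rw [wOf_append, nodesOf_append]
      have hmono : ∀ u, u ∈ nodesOf ts → u ∈ PySem.Set.add (PySem.Set.add (nodesOf ts) t.1) t.2.1 := by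
        intro u hu
        rw [PySem.Set.mem_add, PySem.Set.mem_add]
        exact Or.inl (Or.inl hu)
      unfold WFW at *
      unfold wStep
      split_ifs with hne
      · by_cases hc : (wOf ts).contains (pKey t.1 t.2.1) = true
        · rw [PySem.Dict.keys_insert_of_contains _ _ hc]
          exact ⟨hnd, fun k hk => ⟨(hmem k hk).1, hmono _ (hmem k hk).2.1, hmono _ (hmem k hk).2.2⟩⟩
        · rw [PySem.Dict.keys_insert_of_not_contains _ _ (by simpa using hc)]
          have hknew : pKey t.1 t.2.1 ∉ (wOf ts).keys := by
            rw [PySem.Dict.contains_eq_decide_mem_keys] at hc; simpa using hc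
          constructor
          · simp [List.nodup_append, hnd]
            intro a b hab e; exact hknew (e ▸ hab)
          · intro k hk
            rcases List.mem_append.1 hk with hk | hk
            · exact ⟨(hmem k hk).1, hmono _ (hmem k hk).2.1, hmono _ (hmem k hk).2.2⟩
            · simp at hk
              subst hk
              refine ⟨pKey_fst_lt _ _ hne, ?_, ?_⟩
              · rcases pKey_mem_left t.1 t.2.1 with h | h <;> rw [h] <;>
                  simp [PySem.Set.mem_add]
              · rcases pKey_mem_right t.1 t.2.1 with h | h <;> rw [h] <;>
                  simp [PySem.Set.mem_add]
      · exact ⟨hnd, fun k hk => ⟨(hmem k hk).1, hmono _ (hmem k hk).2.1, hmono _ (hmem k hk).2.2⟩⟩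

-- padj computation lemmas
lemma padj_contains (N : List Int) (g : Int → PySem.Dict Int Int) (u : Int) :
    (padj N g).contains u = decide (u ∈ N) := by
  simp [padj, PySem.Dict.contains, List.any_map, Function.comp_def, List.any_beq']

lemma padj_getD (N : List Int) (g : Int → PySem.Dict Int Int) (u : Int)
    (hN : N.Nodup) (hu : u ∈ N) (d : PySem.Dict Int Int) : (padj N g).getD u d = g u := by
  apply PySem.Dict.getD_of_mem_items
  · exact List.mem_map_of_mem hu
  · simpa [padj, PySem.Dict.keys_mk, List.map_map, Function.comp_def] using hN

lemma padj_insert_mem (N : List Int) (g : Int → PySem.Dict Int Int) (u : Int)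
    (hu : u ∈ N) (v : PySem.Dict Int Int) :
    (padj N g).insert u v = padj N (fun n => if n = u then v else g n) := by
  apply PySem.Dict.ext
  rw [PySem.Dict.items_insert_of_contains _ _ (by simp [padj_contains, hu])]
  show List.map _ (List.map _ N) = _
  rw [List.map_map]
  apply List.map_congr_left
  intro n _
  by_cases hn : n = u <;> simp [hn]

lemma padj_insert_not_mem (N : List Int) (g : Int → PySem.Dict Int Int) (u : Int)
    (hu : u ∉ N) (v : PySem.Dict Int Int) :
    (padj N g).insert u v = padj (N ++ [u]) (fun n => if n = u then v else g n) := by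
  apply PySem.Dict.ext
  rw [PySem.Dict.items_insert_of_not_contains _ _ (by simp [padj_contains, hu])]
  show (List.map _ N) ++ _ = List.map _ (N ++ [u])
  rw [List.map_append]
  congr 1
  · apply List.map_congr_left
    intro n hn
    have : n ≠ u := fun e => hu (e ▸ hn)
    simp [this]
  · simp

lemma padj_congr (N : List Int) (g g' : Int → PySem.Dict Int Int)
    (h : ∀ u ∈ N, g u = g' u) : padj N g = padj N g' := by
  apply PySem.Dict.ext
  exact List.map_congr_left (fun u hu => by rw [h u hu])

def otherOf (k : Int × Int) (u : Int) : Int := if k.1 = u then k.2 else k.1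

lemma pKey_eval_lt {x y : Int} (h : x < y) : pKey x y = (x, y) := by simp [pKey, h]
lemma pKey_eval_gt {x y : Int} (h : y < x) : pKey x y = (y, x) := by
  simp [pKey, show ¬ x < y by omega]

lemma otherOf_pKey {x y : Int} (h : x ≠ y) : otherOf (pKey x y) x = y := by
  rcases lt_or_gt_of_ne h with hlt | hgt
  · simp [pKey_eval_lt hlt, otherOf]
  · simp [pKey_eval_gt hgt, otherOf, show y ≠ x by omega]

lemma otherOf_ne {k : Int × Int} (hlt : k.1 < k.2) {u : Int} (hinc : u = k.1 ∨ u = k.2) :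
    otherOf k u ≠ u := by
  unfold otherOf; rcases hinc with h | h <;> split_ifs <;> omega

-- an entry of W incident to u with the other endpoint o has the key pKey o u
lemma key_eq_pKey {W : PySem.Dict (Int × Int) Int} {N : List Int} (hwf : WFW W N)
    {k : Int × Int} (hk : k ∈ W.keys) {u : Int} (hinc : u = k.1 ∨ u = k.2) :
    k = pKey (otherOf k u) u := by
  have hlt := (hwf.2 k hk).1
  obtain ⟨a, b⟩ := k
  simp only at hlt hinc
  unfold otherOf
  by_cases h1 : a = u
  · simp only [if_pos h1]
    rw [← h1, pKey_eval_gt hlt]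
  · have hub : u = b := by tauto
    simp only [if_neg h1]
    rw [hub, pKey_eval_lt hlt]

lemma mem_keys_of_mem_inner {W : PySem.Dict (Int × Int) Int} {u : Int} {p : Int × Int}
    (hp : p ∈ innerList W u) :
    ∃ kv ∈ W.items, (u = kv.1.1 ∨ u = kv.1.2) ∧ p = (otherOf kv.1 u, kv.2) := by
  unfold innerList at hp
  obtain ⟨kv, hkv, hmap⟩ := List.mem_map.1 hp
  have hfil := List.mem_filter.1 hkv
  refine ⟨kv, hfil.1, by simpa using hfil.2, ?_⟩
  rw [← hmap]
  by_cases h : kv.1.1 = u <;> simp [otherOf, h]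

lemma inner_mem_of (W : PySem.Dict (Int × Int) Int) {kv : (Int × Int) × Int}
    (hkv : kv ∈ W.items) {u : Int} (hinc : u = kv.1.1 ∨ u = kv.1.2) :
    (otherOf kv.1 u, kv.2) ∈ innerList W u := by
  unfold innerList
  apply List.mem_map.2
  refine ⟨kv, List.mem_filter.2 ⟨hkv, by simpa using hinc⟩, ?_⟩
  by_cases h : kv.1.1 = u <;> simp [otherOf, h]

lemma contains_inner_iff {W : PySem.Dict (Int × Int) Int} {N : List Int} (hwf : WFW W N)
    {u v : Int} (hvu : v ≠ u) :
    (PySem.Dict.mk (innerList W u)).contains v = true ↔ pKey v u ∈ W.keys := by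
  constructor
  · intro hc
    simp only [PySem.Dict.contains, List.any_eq_true] at hc
    obtain ⟨p, hp, hbeq⟩ := hc
    have hpv : p.1 = v := by simpa using hbeq
    obtain ⟨kv, hkv, hinc, hpe⟩ := mem_keys_of_mem_inner hp
    have hkk : kv.1 ∈ W.keys := List.mem_map_of_mem hkv
    have := key_eq_pKey hwf hkk hinc
    have hov : otherOf kv.1 u = v := by rw [hpe] at hpv; simpa using hpv
    rw [← hov]
    rw [← this]
    exact hkk
  · intro hk
    obtain ⟨kv, hkv, hke⟩ := List.mem_map.1 hk
    have hinc : u = kv.1.1 ∨ u = kv.1.2 := by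
      rcases lt_or_gt_of_ne hvu with hlt | hgt
      · rw [hke, pKey_eval_lt hlt]; right; rfl
      · rw [hke, pKey_eval_gt hgt]; left; rfl
    have hov : otherOf kv.1 u = v := by
      rw [hke, pKey_comm]; exact otherOf_pKey (Ne.symm hvu)
    have := inner_mem_of W hkv hinc
    rw [hov] at this
    simp only [PySem.Dict.contains, List.any_eq_true]
    exact ⟨(v, kv.2), this, by simp⟩

lemma items_nodup {W : PySem.Dict (Int × Int) Int} (hnd : W.keys.Nodup) : W.items.Nodup :=
  (List.Nodup.of_map _) hnd

lemma inner_keys_nodup {W : PySem.Dict (Int × Int) Int} {N : List Int} (hwf : WFW W N)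
    (u : Int) : (PySem.Dict.mk (innerList W u)).keys.Nodup := by
  rw [PySem.Dict.keys_mk]
  unfold innerList
  rw [List.map_map]
  have hfn : (W.items.filter (fun kv => decide (u = kv.1.1 ∨ u = kv.1.2))).Nodup :=
    (items_nodup hwf.1).filter _
  apply List.Nodup.map_on _ hfn
  intro kv1 h1 kv2 h2 he
  have h1' := List.mem_filter.1 h1
  have h2' := List.mem_filter.1 h2
  have hinc1 : u = kv1.1.1 ∨ u = kv1.1.2 := by simpa using h1'.2
  have hinc2 : u = kv2.1.1 ∨ u = kv2.1.2 := by simpa using h2'.2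
  have ho : otherOf kv1.1 u = otherOf kv2.1 u := by
    simpa [otherOf, Function.comp] using he
  have hk1 := key_eq_pKey hwf (List.mem_map_of_mem h1'.1) hinc1
  have hk2 := key_eq_pKey hwf (List.mem_map_of_mem h2'.1) hinc2
  have hkeq : kv1.1 = kv2.1 := by rw [hk1, hk2, ho]
  have hv1 := PySem.Dict.get?_of_mem_items (d := W) (by exact h1'.1) hwf.1
  have hv2 := PySem.Dict.get?_of_mem_items (d := W) (by exact h2'.1) hwf.1
  rw [hkeq] at hv1
  rw [hv1] at hv2
  injection hv2 with hveq
  exact Prod.ext hkeq hveq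

lemma getD_inner {W : PySem.Dict (Int × Int) Int} {N : List Int} (hwf : WFW W N)
    {k : Int × Int} {v : Int} (hkv : (k, v) ∈ W.items) {u : Int} (hinc : u = k.1 ∨ u = k.2) :
    (PySem.Dict.mk (innerList W u)).getD (otherOf k u) 0 = v := by
  apply PySem.Dict.getD_of_mem_items
  · exact inner_mem_of W hkv hinc
  · exact inner_keys_nodup hwf u

lemma inner_of_not_mem {W : PySem.Dict (Int × Int) Int} {N : List Int} (hwf : WFW W N)
    {u : Int} (hu : u ∉ N) : innerList W u = [] := by
  unfold innerList
  rw [List.filter_eq_nil_iff.2, List.map_nil]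
  intro kv hkv
  have hk := hwf.2 kv.1 (List.mem_map_of_mem hkv)
  simp only [decide_eq_true_eq]
  rintro (h | h) <;> [exact hu (h ▸ hk.2.1); exact hu (h ▸ hk.2.2)]

-- updating W at a key NOT incident to u leaves u's inner list unchanged
lemma inner_ins_not_incident {W : PySem.Dict (Int × Int) Int} {u : Int}
    {k : Int × Int} (hu1 : u ≠ k.1) (hu2 : u ≠ k.2) (w0 : Int) :
    innerList (W.insert k w0) u = innerList W u := by
  unfold innerList
  by_cases hc : W.contains k = true
  · rw [PySem.Dict.items_insert_of_contains _ _ hc]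
    rw [List.filter_map, List.map_map]
    have hq : ∀ p : (Int × Int) × Int,
        ((fun kv => decide (u = kv.1.1 ∨ u = kv.1.2)) ∘
          (fun p => if (p.1 == k) = true then (k, w0) else p)) p
          = decide (u = p.1.1 ∨ u = p.1.2) := by
      intro p
      by_cases h : p.1 = k
      · simp [h, Function.comp]
      · simp [Function.comp, show (p.1 == k) = false by simpa using h]
    rw [List.filter_congr (fun p _ => hq p)]
    apply List.map_congr_left
    intro p hp
    have hp' := List.mem_filter.1 hp
    have hinc : u = p.1.1 ∨ u = p.1.2 := by simpa using hp'.2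
    have hpk : p.1 ≠ k := by
      rintro rfl
      rcases hinc with h | h <;> [exact hu1 h; exact hu2 h]
    simp [hpk]
  · rw [PySem.Dict.items_insert_of_not_contains _ _ (by simpa using hc)]
    rw [List.filter_append, List.map_append]
    have : List.filter (fun kv => decide (u = kv.1.1 ∨ u = kv.1.2)) [(k, w0)] = [] := by
      simp [hu1, hu2]
    rw [this, List.map_nil, List.append_nil]

-- a FRESH key incident to u appends the new neighbour at the end of u's inner list
lemma inner_ins_fresh {W : PySem.Dict (Int × Int) Int} {u : Int}
    {k : Int × Int} (hc : W.contains k = false) (hinc : u = k.1 ∨ u = k.2) (w0 : Int) :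
    innerList (W.insert k w0) u = innerList W u ++ [(otherOf k u, w0)] := by
  unfold innerList
  rw [PySem.Dict.items_insert_of_not_contains _ _ hc]
  rw [List.filter_append, List.map_append]
  congr 1
  have : List.filter (fun kv => decide (u = kv.1.1 ∨ u = kv.1.2)) [(k, w0)] = [(k, w0)] := by
    simp [hinc]
  rw [this]
  by_cases h : k.1 = u <;> simp [otherOf, h]

-- overwriting an EXISTING key incident to u is an in-place insert on u's inner dict
lemma inner_insert_existing {W : PySem.Dict (Int × Int) Int} {N : List Int} (hwf : WFW W N)
    {k : Int × Int} {v : Int} (hkv : (k, v) ∈ W.items) {u : Int}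
    (hinc : u = k.1 ∨ u = k.2) (m : Int) :
    (PySem.Dict.mk (innerList W u)).insert (otherOf k u) m
      = PySem.Dict.mk (innerList (W.insert k m) u) := by
  have hkk : k ∈ W.keys := List.mem_map_of_mem hkv
  have hlt := (hwf.2 k hkk).1
  have hou : otherOf k u ≠ u := otherOf_ne hlt hinc
  have hcW : W.contains k = true := by
    rw [PySem.Dict.contains_eq_decide_mem_keys]; simpa using hkk
  have hcI : (PySem.Dict.mk (innerList W u)).contains (otherOf k u) = true := by
    rw [contains_inner_iff hwf hou]
    rw [← key_eq_pKey hwf hkk hinc]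
    exact hkk
  apply PySem.Dict.ext
  rw [PySem.Dict.items_insert_of_contains _ _ hcI]
  show List.map _ (innerList W u) = _
  unfold innerList
  rw [PySem.Dict.items_insert_of_contains _ _ hcW]
  rw [List.filter_map, List.map_map]
  have hq : ∀ p : (Int × Int) × Int,
      ((fun kv => decide (u = kv.1.1 ∨ u = kv.1.2)) ∘
        (fun p => if (p.1 == k) = true then (k, m) else p)) p
        = decide (u = p.1.1 ∨ u = p.1.2) := by
    intro p
    by_cases h : p.1 = k
    · simp [Function.comp, h, hinc]
    · simp [Function.comp, h]
  rw [List.filter_congr (fun p _ => hq p)]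
  rw [List.map_map]
  apply List.map_congr_left
  intro p hp
  have hp' := List.mem_filter.1 hp
  have hincp : u = p.1.1 ∨ u = p.1.2 := by simpa using hp'.2
  by_cases hpk : p.1 = k
  · simp [Function.comp, hpk, otherOf]
  · have hone : otherOf p.1 u ≠ otherOf k u := by
      intro he
      apply hpk
      rw [key_eq_pKey hwf (List.mem_map_of_mem hp'.1) hincp,
          key_eq_pKey hwf hkk hinc, he]
    have hone' : ((if p.1.1 = u then p.1.2 else p.1.1) : Int) ≠ (if k.1 = u then k.2 else k.1) := by
      simpa [otherOf] using hone
    simp [Function.comp, hpk, otherOf, hone']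

lemma WFW_mono {W : PySem.Dict (Int × Int) Int} {N N' : List Int} (hwf : WFW W N)
    (h : ∀ u ∈ N, u ∈ N') : WFW W N' :=
  ⟨hwf.1, fun k hk => ⟨(hwf.2 k hk).1, h _ (hwf.2 k hk).2.1, h _ (hwf.2 k hk).2.2⟩⟩

lemma mem_set_add_self (s : List Int) (x : Int) : x ∈ PySem.Set.add s x :=
  (PySem.Set.mem_add s x x).2 (Or.inr rfl)

lemma mem_set_add_of_mem {s : List Int} {y : Int} (h : y ∈ s) (x : Int) :
    y ∈ PySem.Set.add s x := (PySem.Set.mem_add s x y).2 (Or.inl h)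

-- 'if x not in adj: adj[x] = {}' on a well-formed adjacency dict
lemma insert_missing {W : PySem.Dict (Int × Int) Int} {N : List Int}
    (hwf : WFW W N) (x : Int) :
    (if (padj N (fun u => PySem.Dict.mk (innerList W u))).contains x = true
      then padj N (fun u => PySem.Dict.mk (innerList W u))
      else (padj N (fun u => PySem.Dict.mk (innerList W u))).insert x PySem.Dict.empty)
    = padj (PySem.Set.add N x) (fun u => PySem.Dict.mk (innerList W u)) := by
  rw [padj_contains]
  by_cases hx : x ∈ N
  · rw [if_pos (by simpa using hx)]
    unfold PySem.Set.add
    rw [if_pos (by simpa using hx)]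
  · rw [if_neg (by simpa using hx)]
    rw [padj_insert_not_mem _ _ _ hx]
    unfold PySem.Set.add
    rw [if_neg (by simpa using hx)]
    apply padj_congr
    intro u hu
    by_cases hux : u = x
    · rw [if_pos hux, hux, inner_of_not_mem hwf hx]
      rfl
    · rw [if_neg hux]

lemma stepA_step (ts : List (Int × Int × Int)) (t : Int × Int × Int) :
    pvStepA (dictOf ts) t = dictOf (ts ++ [t]) := by
  obtain ⟨x, y, w⟩ := t
  have hN := nodesOf_nodup ts
  have hwf := wOf_wf ts
  set N := nodesOf ts
  set W := wOf ts
  -- the two node insertions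
  have hN1 : (PySem.Set.add N x).Nodup := set_add_nodup _ hN _
  have hN2 : (PySem.Set.add (PySem.Set.add N x) y).Nodup := set_add_nodup _ hN1 _
  have hmono2 : ∀ u ∈ N, u ∈ PySem.Set.add (PySem.Set.add N x) y :=
    fun u hu => mem_set_add_of_mem (mem_set_add_of_mem hu x) y
  have hwf1 : WFW W (PySem.Set.add N x) := WFW_mono hwf (fun u hu => mem_set_add_of_mem hu x)
  have hwf2 : WFW W (PySem.Set.add (PySem.Set.add N x) y) := WFW_mono hwf hmono2
  have hxN2 : x ∈ PySem.Set.add (PySem.Set.add N x) y :=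
    mem_set_add_of_mem (mem_set_add_self N x) y
  have hyN2 : y ∈ PySem.Set.add (PySem.Set.add N x) y :=
    mem_set_add_self (PySem.Set.add N x) y
  show pvStepA (padj N (fun u => PySem.Dict.mk (innerList W u))) (x, y, w)
      = dictOf (ts ++ [(x, y, w)])
  unfold dictOf
  rw [nodesOf_append, wOf_append]
  unfold pvStepA
  simp only []
  rw [insert_missing hwf x]
  rw [insert_missing hwf1 y]
  set N2 := PySem.Set.add (PySem.Set.add N x) y
  by_cases hxy : x = y
  · rw [if_neg (show ¬ x ≠ y from by simpa using hxy)]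
    unfold wStep
    simp only [if_neg (show ¬ x ≠ y from by simpa using hxy)]
    rfl
  · have hxy' : x ≠ y := hxy
    rw [if_pos hxy']
    unfold wStep
    simp only [if_pos (show x ≠ y from hxy')]
    set k := pKey x y with hkdef
    have hcomp : (k.1 = x ∧ k.2 = y) ∨ (k.1 = y ∧ k.2 = x) := by
      rcases lt_or_gt_of_ne hxy' with h | h
      · left; rw [hkdef, pKey_eval_lt h]; exact ⟨rfl, rfl⟩
      · right; rw [hkdef, pKey_eval_gt h]; exact ⟨rfl, rfl⟩
    have hky : y = k.1 ∨ y = k.2 := by rcases hcomp with ⟨h1, h2⟩ | ⟨h1, h2⟩ <;> omega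
    have hkx : x = k.1 ∨ x = k.2 := by rcases hcomp with ⟨h1, h2⟩ | ⟨h1, h2⟩ <;> omega
    have hokx : otherOf k x = y := by rw [hkdef]; exact otherOf_pKey hxy'
    have hoky : otherOf k y = x := by
      rw [hkdef, pKey_comm]; exact otherOf_pKey (Ne.symm hxy')
    rw [padj_getD _ _ y hN2 hyN2]
    by_cases hk : k ∈ W.keys
    · -- parallel street: overwrite with the min
      obtain ⟨kv, hkvm, hkve⟩ := List.mem_map.1 hk
      obtain ⟨k', v⟩ := kv
      simp only at hkve
      subst hkve
      have hcI : (PySem.Dict.mk (innerList W y)).contains x = true :=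
        (contains_inner_iff hwf2 hxy').2 hk
      rw [if_neg (by simp [hcI])]
      rw [padj_getD _ _ x hN2 hxN2]
      have hgx : (PySem.Dict.mk (innerList W x)).getD y 0 = v := by
        have := getD_inner hwf2 hkvm hkx
        rwa [hokx] at this
      rw [hgx]
      rw [padj_insert_mem _ _ _ hxN2]
      rw [padj_getD _ _ y hN2 hyN2]
      rw [if_neg (Ne.symm hxy')]
      have hgy : (PySem.Dict.mk (innerList W y)).getD x 0 = v := by
        have := getD_inner hwf2 hkvm hky
        rwa [hoky] at this
      rw [hgy]
      rw [padj_insert_mem _ _ _ hyN2]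
      have hWv : W.getD k w = v := PySem.Dict.getD_of_mem_items W hkvm hwf.1 w
      rw [hWv]
      apply padj_congr
      intro u hu
      by_cases huy : u = y
      · rw [if_pos huy, huy]
        have := inner_insert_existing hwf2 hkvm hky (min w v)
        rwa [hoky] at this
      · rw [if_neg huy]
        by_cases hux : u = x
        · rw [if_pos hux, hux]
          have := inner_insert_existing hwf2 hkvm hkx (min w v)
          rwa [hokx] at this
        · rw [if_neg hux]
          have hu1 : u ≠ k.1 := by rcases hcomp with ⟨h1, h2⟩ | ⟨h1, h2⟩ <;> omega
          have hu2 : u ≠ k.2 := by rcases hcomp with ⟨h1, h2⟩ | ⟨h1, h2⟩ <;> omega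
          rw [inner_ins_not_incident hu1 hu2 (min w v)]
    · -- first street between these endpoints
      have hcI : (PySem.Dict.mk (innerList W y)).contains x = false := by
        rw [← Bool.not_eq_true]
        simp only [contains_inner_iff hwf2 hxy']
        simpa using hk
      rw [if_pos (by simp [hcI])]
      rw [padj_getD _ _ x hN2 hxN2]
      rw [padj_insert_mem _ _ _ hxN2]
      rw [padj_getD _ _ y hN2 hyN2]
      rw [if_neg (Ne.symm hxy')]
      rw [padj_insert_mem _ _ _ hyN2]
      have hcW : W.contains k = false := by
        rw [PySem.Dict.contains_eq_decide_mem_keys]; simpa using hk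
      have hWv : W.getD k w = w := PySem.Dict.getD_of_not_contains W w hcW
      rw [hWv, min_self]
      apply padj_congr
      intro u hu
      by_cases huy : u = y
      · rw [if_pos huy, huy]
        have hfresh : (PySem.Dict.mk (innerList W y)).contains x = false := by
          rw [← Bool.not_eq_true]
          simp only [contains_inner_iff hwf2 hxy']
          simpa using hk
        apply PySem.Dict.ext
        rw [PySem.Dict.items_insert_of_not_contains _ _ hfresh]
        rw [inner_ins_fresh hcW hky w, hoky]
      · rw [if_neg huy]
        by_cases hux : u = x
        · rw [if_pos hux, hux]
          have hfresh : (PySem.Dict.mk (innerList W x)).contains y = false := by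
            rw [← Bool.not_eq_true]
            simp only [contains_inner_iff hwf2 (Ne.symm hxy')]
            rw [hkdef] at hk
            rw [pKey_comm]
            simpa using hk
          apply PySem.Dict.ext
          rw [PySem.Dict.items_insert_of_not_contains _ _ hfresh]
          rw [inner_ins_fresh hcW hkx w, hokx]
        · rw [if_neg hux]
          have hu1 : u ≠ k.1 := by rcases hcomp with ⟨h1, h2⟩ | ⟨h1, h2⟩ <;> omega
          have hu2 : u ≠ k.2 := by rcases hcomp with ⟨h1, h2⟩ | ⟨h1, h2⟩ <;> omega
          rw [inner_ins_not_incident hu1 hu2 w]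

lemma foldA_eq (ts : List (Int × Int × Int)) :
    ts.foldl pvStepA PySem.Dict.empty = dictOf ts := by
  induction ts using List.reverseRecOn with
  | nil => rfl
  | append_singleton ts t ih =>
      rw [List.foldl_append, List.foldl_cons, List.foldl_nil, ih, stepA_step]

lemma ends_match (r : List Int) (h : r ≠ []) (adj : PySem.Dict Int (PySem.Dict Int Int)) :
    (match PySem.List.pyGet? r 0, PySem.List.pyGet? r (-1) with
     | some x, some y => pvStepA adj (x, y, (r.length : Int))
     | _, _ => adj) = pvStepA adj (pvEndsB r) := by
  cases r with
  | nil => simp at h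
  | cons a t =>
      have h0 : (PySem.List.pyGet? (a :: t) 0).isSome := by
        simp [PySem.List.pyGet?, PySem.List.pyIdx?]
      have h1 : (PySem.List.pyGet? (a :: t) (-1)).isSome := by
        simp [PySem.List.pyGet?, PySem.List.pyIdx?]
      obtain ⟨x, hx⟩ := Option.isSome_iff_exists.1 h0
      obtain ⟨y, hy⟩ := Option.isSome_iff_exists.1 h1
      unfold pvEndsB
      rw [hx, hy]
      rfl

lemma alt_eq (ruas : List (List Int)) :
    build_alt ruas = (nodesOf (ruas.map pvEndsB)).map
      (fun u => (u, innerList (wOf (ruas.map pvEndsB)) u)) := by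
  unfold build_alt
  show List.map (fun u => (u,
        innerList (List.foldl pvStepB ([], PySem.Dict.empty) (List.map pvEndsB ruas)).2 u))
      (List.foldl pvStepB ([], PySem.Dict.empty) (List.map pvEndsB ruas)).1 = _
  have hsplit : ∀ (s : List Int × PySem.Dict (Int × Int) Int) t,
      pvStepB s t = (nStep s.1 t, wStep s.2 t) := by
    intro s t
    unfold pvStepB nStep wStep pKey
    split_ifs <;> rfl
  rw [PySem.List.foldl_congr_mem _ _ (fun s t => (nStep s.1 t, wStep s.2 t)) _
      (fun acc x _ => hsplit acc x)]
  rw [PySem.List.foldl_prod_mk]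
  rfl

theorem build_spec : Claim_equal_build := by
  intro ruas _ hpre
  unfold Spec_build build
  rw [PySem.List.foldl_congr_mem _ _ (fun adj r => pvStepA adj (pvEndsB r)) _
      (fun acc r hr => ends_match r (hpre r hr) acc)]
  rw [← List.foldl_map]
  rw [foldA_eq]
  rw [alt_eq]
  unfold dictOf padj
  rw [List.map_map]
  rfl
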